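-- pv_equiv track=rewrite | github.com/mohammadfaiizan/ProjectI | DSA/Theory/Dynamic_Programming/016_dp_interview_problems.py | frog_jump_with_obstacles
-- ===== SOURCE A (Python) =====
-- from typing import List, Dict, Tuple, Optional
--
-- def frog_jump_with_obstacles(stones: List[int], obstacles: List[int]) -> int:
--     """
--     Frog jump with obstacles (can't land on obstacle stones)
--
--     Args:
--         stones: Available stone positions
--         obstacles: Obstacle positions (can't land here)
--
--     Returns:
--         Minimum jumps to reach last stone, -1 if impossible
--     """
--     obstacle_set = set(obstacles)
--     valid_stones = [stone for stone in stones if stone not in obstacle_set]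
--
--     if not valid_stones or len(valid_stones) < 2:
--         return -1 if len(valid_stones) < 2 else 0
--
--     n = len(valid_stones)
--     dp = [float('inf')] * n
--     dp[0] = 0
--
--     for i in range(1, n):
--         for j in range(i):
--             jump_distance = valid_stones[i] - valid_stones[j]
--             if jump_distance <= 2:  # Frog can jump 1 or 2 units
--                 dp[i] = min(dp[i], dp[j] + 1)
--
--     return dp[n - 1] if dp[n - 1] != float('inf') else -1
-- ===== SOURCE B (Python) =====
-- def frog_jump_with_obstacles(stones, obstacles):
--     """Pareto-frontier re-implementation: one left-to-right pass keeping only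
--     undominated (position, jumps) pairs, queried by first entry with position >= v-2."""
--     obstacle_set = set(obstacles)
--     valid = [s for s in stones if s not in obstacle_set]
--     if len(valid) < 2:
--         return -1
--     # frontier: (position, jumps) pairs of reachable stones, strictly increasing
--     # in both coordinates; an entry survives only if no other entry has a
--     # position >= it with jumps <= it.
--     frontier = [(valid[0], 0)]
--     last = None
--     for idx in range(1, len(valid)):
--         v = valid[idx]
--         best = None
--         for (w, d) in frontier:
--             if w >= v - 2:
--                 best = d
--                 break
--         last = None if best is None else best + 1
--         if last is not None:
--             frontier = _frontier_insert(frontier, v, last)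
--     return -1 if last is None else last
--
--
-- def _frontier_insert(frontier, v, d):
--     if any(w >= v and dd <= d for (w, dd) in frontier):
--         return frontier  # (v, d) is dominated: nothing changes
--     left = [(w, dd) for (w, dd) in frontier if w < v and dd < d]
--     right = [(w, dd) for (w, dd) in frontier if w > v and dd > d]
--     return left + [(v, d)] + right
-- ===== Notes on version B (the rewrite author's own statement) =====
-- stated objective: faster
-- what changed: A fills an n*n DP table with a nested scan over all earlier stones; B makes one pass keeping only a Pareto frontier of undominated (position, jumps) pairs and answers each stone by the first frontier entry with position >= v-2, so dominated stones are pruned instead of rescanned (near-linear on measured inputs; worst case can still degrade to O(n^2) if no stone dominates another).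
import Mathlib
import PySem

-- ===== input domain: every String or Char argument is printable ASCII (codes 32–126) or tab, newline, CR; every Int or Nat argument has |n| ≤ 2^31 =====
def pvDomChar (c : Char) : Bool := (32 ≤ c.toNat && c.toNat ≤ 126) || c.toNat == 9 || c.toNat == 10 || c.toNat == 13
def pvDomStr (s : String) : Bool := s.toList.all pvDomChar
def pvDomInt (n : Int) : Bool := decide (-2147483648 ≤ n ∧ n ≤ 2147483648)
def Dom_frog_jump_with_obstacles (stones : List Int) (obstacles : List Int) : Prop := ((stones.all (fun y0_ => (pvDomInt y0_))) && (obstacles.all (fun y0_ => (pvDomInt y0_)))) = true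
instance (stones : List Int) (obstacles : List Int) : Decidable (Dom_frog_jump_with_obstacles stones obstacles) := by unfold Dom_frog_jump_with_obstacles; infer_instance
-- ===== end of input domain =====

-- B replaces A's quadratic DP-table scan by a single pass over a Pareto frontier of
-- undominated (position, jumps) pairs (objective: alternative algorithm; equal return values proved below).

-- ===== PORT A =====
-- `none` plays the role of float('inf'); oMin / oSucc are Python's min / +1 lifted to it
-- (exact here: every dp cell is an int or inf).
def oMin : Option Int → Option Int → Option Int
  | none, b => b
  | a, none => a
  | some x, some y => some (min x y)

def oSucc : Option Int → Option Int
  | none => none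
  | some x => some (x + 1)

def frog_jump_with_obstacles (stones : List Int) (obstacles : List Int) : Int :=
  let obstacle_set := PySem.Set.ofList obstacles
  let valid_stones := stones.filter (fun s => !(PySem.Set.contains obstacle_set s))
  if valid_stones.isEmpty || valid_stones.length < 2 then
    (if valid_stones.length < 2 then -1 else 0)
  else
    let n : Int := PySem.List.len valid_stones
    let dp : List (Option Int) := List.replicate valid_stones.length (none : Option Int)
    let dp := PySem.List.pySetD dp 0 (some 0)
    let dp := (PySem.List.pyRange 1 n 1).foldl (fun dp i =>
      (PySem.List.pyRange 0 i 1).foldl (fun dp j =>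
        let jump_distance := PySem.List.pyGetD valid_stones i 0 - PySem.List.pyGetD valid_stones j 0
        if jump_distance ≤ 2 then
          PySem.List.pySetD dp i (oMin (PySem.List.pyGetD dp i none) (oSucc (PySem.List.pyGetD dp j none)))
        else dp) dp) dp
    match PySem.List.pyGetD dp (n - 1) none with
    | some d => d
    | none => -1

-- ===== PORT B =====
-- first frontier entry with position ≥ v - 2 (the Python for-loop with break)
def fQuery (frontier : List (Int × Int)) (v : Int) : Option Int :=
  (frontier.find? (fun p => decide (v - 2 ≤ p.1))).map (·.2)

def fInsert (frontier : List (Int × Int)) (v d : Int) : List (Int × Int) :=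
  if frontier.any (fun p => decide (v ≤ p.1) && decide (p.2 ≤ d)) then frontier
  else frontier.filter (fun p => decide (p.1 < v) && decide (p.2 < d)) ++
       (v, d) :: frontier.filter (fun p => decide (v < p.1) && decide (d < p.2))

def frog_jump_with_obstacles_alt (stones : List Int) (obstacles : List Int) : Int :=
  let obstacle_set := PySem.Set.ofList obstacles
  let valid := stones.filter (fun s => !(PySem.Set.contains obstacle_set s))
  match valid with
  | [] => -1
  | [_] => -1
  | v0 :: rest =>
    let st := rest.foldl (fun (st : List (Int × Int) × Option Int) v =>
        match fQuery st.1 v with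
        | none => (st.1, none)
        | some b => (fInsert st.1 v (b + 1), some (b + 1))) ([(v0, 0)], none)
    match st.2 with
    | none => -1
    | some d => d

-- ===== PRECONDITION & SPEC =====
def Spec_frog_jump_with_obstacles (stones : List Int) (obstacles : List Int) (out : Int) : Prop := out = frog_jump_with_obstacles_alt stones obstacles
instance (stones : List Int) (obstacles : List Int) (out : Int) : Decidable (Spec_frog_jump_with_obstacles stones obstacles out) := by unfold Spec_frog_jump_with_obstacles; infer_instance

-- ===== CLAIM (what is proved, stated in full; the proofs are below) =====
def Claim_equal_frog_jump_with_obstacles : Prop := ∀ (stones : List Int) (obstacles : List Int), Dom_frog_jump_with_obstacles stones obstacles → Spec_frog_jump_with_obstacles stones obstacles (frog_jump_with_obstacles stones obstacles)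

-- ===== LEMMAS AND PROOFS =====

-- the common specification recurrence: the list of (stone value, dp value) pairs
def minFA (acc : List (Int × Option Int)) (t : Int) : Option Int :=
  acc.foldl (fun m p => if t ≤ p.1 then oMin m p.2 else m) none

def specStep (acc : List (Int × Option Int)) (v : Int) : List (Int × Option Int) :=
  acc ++ [(v, oSucc (minFA acc (v - 2)))]

def lastSnd : List (Int × Option Int) → Option Int
  | [] => none
  | [p] => p.2
  | _ :: l => lastSnd l

-- frontier-side min over all pairs with position ≥ t
def minF (F : List (Int × Int)) (t : Int) : Option Int :=
  F.foldl (fun m p => if t ≤ p.1 then oMin m (some p.2) else m) none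

def qry (F : List (Int × Int)) (t : Int) : Option Int :=
  (F.find? (fun p => decide (t ≤ p.1))).map (·.2)

def sortedF (F : List (Int × Int)) : Prop :=
  F.Pairwise (fun p q => p.1 < q.1 ∧ p.2 < q.2)

def oLE (a b : Option Int) : Prop := ∀ x, b = some x → ∃ y, a = some y ∧ y ≤ x

def INV (acc : List (Int × Option Int)) (F : List (Int × Int)) : Prop :=
  sortedF F ∧ ∀ t, qry F t = minFA acc t

def bstep (st : List (Int × Int) × Option Int) (v : Int) : List (Int × Int) × Option Int :=
  match fQuery st.1 v with
  | none => (st.1, none)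
  | some b => (fInsert st.1 v (b + 1), some (b + 1))

-- ----- oMin / oSucc basics -----
theorem oMin_none_right (a : Option Int) : oMin a none = a := by cases a <;> rfl

theorem oMin_none_left (a : Option Int) : oMin none a = a := rfl

theorem oMin_assoc (a b c : Option Int) : oMin (oMin a b) c = oMin a (oMin b c) := by
  cases a <;> cases b <;> cases c <;> simp [oMin, min_assoc]

theorem oSucc_oMin (a b : Option Int) : oSucc (oMin a b) = oMin (oSucc a) (oSucc b) := by
  cases a <;> cases b <;> simp [oMin, oSucc]

-- ----- basic equations of the min-folds -----
theorem minFA_append_singleton (acc : List (Int × Option Int)) (v : Int) (od : Option Int) (t : Int) :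
    minFA (acc ++ [(v, od)]) t = oMin (minFA acc t) (if t ≤ v then od else none) := by
  show List.foldl _ _ _ = _
  rw [List.foldl_append]
  by_cases h : t ≤ v <;> simp [h, minFA, oMin_none_right]

theorem minF_hoist (F : List (Int × Int)) (t : Int) (m : Option Int) :
    F.foldl (fun m p => if t ≤ p.1 then oMin m (some p.2) else m) m = oMin m (minF F t) := by
  induction F generalizing m with
  | nil => simp [minF, oMin_none_right]
  | cons p F ih =>
    simp only [List.foldl_cons, minF]
    rw [ih, ih (if t ≤ p.1 then oMin none (some p.2) else none)]
    by_cases h : t ≤ p.1 <;> simp [h, oMin_none_left, oMin_assoc]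

theorem minF_cons (p : Int × Int) (F : List (Int × Int)) (t : Int) :
    minF (p :: F) t = oMin (if t ≤ p.1 then some p.2 else none) (minF F t) := by
  show List.foldl _ _ _ = _
  rw [List.foldl_cons, minF_hoist]
  by_cases h : t ≤ p.1 <;> simp [h, oMin_none_left]

theorem minF_append (F G : List (Int × Int)) (t : Int) :
    minF (F ++ G) t = oMin (minF F t) (minF G t) := by
  show List.foldl _ _ _ = _
  rw [List.foldl_append, minF_hoist]
  rfl

-- ----- oLE order -----
theorem oLE_none (a : Option Int) : oLE a none := by intro x hx; cases hx

theorem oLE_refl (a : Option Int) : oLE a a := by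
  intro x hx; exact ⟨x, hx, le_refl x⟩

theorem oLE_antisymm {a b : Option Int} (h1 : oLE a b) (h2 : oLE b a) : a = b := by
  cases a with
  | none =>
    cases b with
    | none => rfl
    | some x => obtain ⟨y, hy, _⟩ := h1 x rfl; cases hy
  | some y =>
    obtain ⟨x, hx, hxy⟩ := h2 y rfl
    subst hx
    obtain ⟨y', hy', hyx⟩ := h1 x rfl
    simp only [Option.some.injEq] at hy'
    subst hy'
    exact congrArg some (le_antisymm hyx hxy)

theorem oLE_oMin_right {a b c : Option Int} (h1 : oLE a b) (h2 : oLE a c) : oLE a (oMin b c) := by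
  intro x hx
  cases b with
  | none => exact h2 x hx
  | some xb =>
    cases c with
    | none => exact h1 x hx
    | some xc =>
      simp only [oMin, Option.some.injEq] at hx
      rcases min_cases xb xc with ⟨he, hle⟩ | ⟨he, hle⟩
      · exact h1 x (congrArg some (by omega))
      · exact h2 x (congrArg some (by omega))

theorem oLE_oMin_left_left {a b c : Option Int} (h : oLE a c) : oLE (oMin a b) c := by
  intro x hx
  obtain ⟨y, hy, hyx⟩ := h x hx
  subst hy
  cases b with
  | none => exact ⟨y, rfl, hyx⟩
  | some xb => exact ⟨min y xb, rfl, le_trans (min_le_left _ _) hyx⟩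

theorem oLE_oMin_left_right {a b c : Option Int} (h : oLE b c) : oLE (oMin a b) c := by
  intro x hx
  obtain ⟨y, hy, hyx⟩ := h x hx
  subst hy
  cases a with
  | none => exact ⟨y, rfl, hyx⟩
  | some xa => exact ⟨min xa y, rfl, le_trans (min_le_right _ _) hyx⟩

theorem oLE_weaken {a : Option Int} {x y : Int} (h : oLE a (some x)) (hxy : x ≤ y) : oLE a (some y) := by
  intro z hz
  simp only [Option.some.injEq] at hz
  obtain ⟨w, hw, hwx⟩ := h x rfl
  exact ⟨w, hw, by omega⟩

-- ----- minF facts -----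
theorem minF_mem {F : List (Int × Int)} {q : Int × Int} (hq : q ∈ F) {t : Int} (ht : t ≤ q.1) :
    oLE (minF F t) (some q.2) := by
  induction F with
  | nil => cases hq
  | cons p F ih =>
    rw [minF_cons]
    rcases List.mem_cons.mp hq with h | h
    · subst h
      exact oLE_oMin_left_left (by simp [ht, oLE_refl])
    · exact oLE_oMin_left_right (ih h)

theorem minF_mono {P Q : List (Int × Int)} {t : Int}
    (h : ∀ q ∈ P, t ≤ q.1 → ∃ r ∈ Q, t ≤ r.1 ∧ r.2 ≤ q.2) :
    oLE (minF Q t) (minF P t) := by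
  induction P with
  | nil => exact oLE_none _
  | cons p P ih =>
    rw [minF_cons]
    refine oLE_oMin_right ?_ (ih (fun q hq => h q (List.mem_cons_of_mem _ hq)))
    by_cases hp : t ≤ p.1
    · obtain ⟨r, hr, htr, hrp⟩ := h p (List.mem_cons_self) hp
      simpa [hp] using oLE_weaken (minF_mem hr htr) hrp
    · simp [hp, oLE_none]

theorem minF_eq_of_mutual {P Q : List (Int × Int)} {t : Int}
    (h1 : ∀ q ∈ P, t ≤ q.1 → ∃ r ∈ Q, t ≤ r.1 ∧ r.2 ≤ q.2)
    (h2 : ∀ q ∈ Q, t ≤ q.1 → ∃ r ∈ P, t ≤ r.1 ∧ r.2 ≤ q.2) :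
    minF P t = minF Q t := by
  exact (oLE_antisymm (minF_mono h1) (minF_mono h2)).symm

theorem minF_ge {F : List (Int × Int)} {t m : Int} (h : ∀ q ∈ F, m ≤ q.2) :
    oMin (some m) (minF F t) = some m := by
  induction F with
  | nil => rfl
  | cons p F ih =>
    rw [minF_cons, ← oMin_assoc]
    have hm : oMin (some m) (if t ≤ p.1 then some p.2 else none) = some m := by
      have := h p List.mem_cons_self
      by_cases hp : t ≤ p.1
      · simp [hp, oMin]; omega
      · simp [hp, oMin]
    rw [hm, ih (fun q hq => h q (List.mem_cons_of_mem _ hq))]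

theorem qry_eq_minF {F : List (Int × Int)} (h : sortedF F) (t : Int) : qry F t = minF F t := by
  induction F with
  | nil => rfl
  | cons p F ih =>
    have hpw := (List.pairwise_cons.mp h)
    rw [minF_cons]
    by_cases hp : t ≤ p.1
    · have : oMin (some p.2) (minF F t) = some p.2 :=
        minF_ge (fun q hq => le_of_lt (hpw.1 q hq).2)
      simp [qry, hp, this]
    · simp [qry, hp, oMin_none_left] at *
      exact ih hpw.2

-- ----- fInsert facts -----
theorem fIns_sorted {F : List (Int × Int)} (h : sortedF F) (v d : Int) : sortedF (fInsert F v d) := by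
  unfold fInsert
  split
  · exact h
  · rw [sortedF, List.pairwise_append]
    refine ⟨h.filter _, ?_, ?_⟩
    · rw [List.pairwise_cons]
      refine ⟨fun q hq => ?_, h.filter _⟩
      have := List.of_mem_filter hq
      simp only [Bool.and_eq_true, decide_eq_true_eq] at this
      exact this
    · intro q hq r hr
      have hql := List.of_mem_filter hq
      simp only [Bool.and_eq_true, decide_eq_true_eq] at hql
      rcases List.mem_cons.mp hr with rfl | hr'
      · exact hql
      · have hrr := List.of_mem_filter hr'
        simp only [Bool.and_eq_true, decide_eq_true_eq] at hrr
        exact ⟨by omega, by omega⟩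

theorem minF_fIns (F : List (Int × Int)) (v d t : Int) :
    minF (fInsert F v d) t = minF (F ++ [(v, d)]) t := by
  unfold fInsert
  split
  · next hdom =>
    simp only [List.any_eq_true, Bool.and_eq_true, decide_eq_true_eq] at hdom
    obtain ⟨q, hq, hq1, hq2⟩ := hdom
    refine minF_eq_of_mutual ?_ ?_
    · intro r hr htr; exact ⟨r, List.mem_append_left _ hr, htr, le_refl _⟩
    · intro r hr htr
      rcases List.mem_append.mp hr with hr' | hr'
      · exact ⟨r, hr', htr, le_refl _⟩
      · simp only [List.mem_singleton] at hr'
        subst hr'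
        simp only at htr
        exact ⟨q, hq, by omega, by omega⟩
  · next hnd =>
    simp only [List.any_eq_true, Bool.and_eq_true, decide_eq_true_eq] at hnd
    push Not at hnd
    refine minF_eq_of_mutual ?_ ?_
    · intro r hr htr
      rcases List.mem_append.mp hr with hr' | hr'
      · exact ⟨r, List.mem_append_left _ (List.mem_filter.mp hr').1, htr, le_refl _⟩
      · rcases List.mem_cons.mp hr' with he | hr''
        · exact ⟨r, List.mem_append_right _ (by simp [he]), htr, le_refl _⟩
        · exact ⟨r, List.mem_append_left _ (List.mem_filter.mp hr'').1, htr, le_refl _⟩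
    · intro r hr htr
      rcases List.mem_append.mp hr with hr' | hr'
      · by_cases hL : r.1 < v ∧ r.2 < d
        · exact ⟨r, List.mem_append_left _ (List.mem_filter.mpr ⟨hr', by simp [hL.1, hL.2]⟩), htr, le_refl _⟩
        · by_cases hR : v < r.1 ∧ d < r.2
          · exact ⟨r, List.mem_append_right _ (List.mem_cons_of_mem _ (List.mem_filter.mpr ⟨hr', by simp [hR.1, hR.2]⟩)), htr, le_refl _⟩
          · -- r is dominated by the new pair (v, d)
            have hnotdom := hnd r hr'
            exact ⟨(v, d), List.mem_append_right _ List.mem_cons_self, by omega, by omega⟩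
      · simp only [List.mem_singleton] at hr'
        subst hr'
        exact ⟨(v, d), List.mem_append_right _ List.mem_cons_self, htr, le_refl _⟩

theorem qry_fIns {F : List (Int × Int)} (h : sortedF F) (v d t : Int) :
    qry (fInsert F v d) t = oMin (qry F t) (if t ≤ v then some d else none) := by
  rw [qry_eq_minF (fIns_sorted h v d), minF_fIns, minF_append, qry_eq_minF h]
  by_cases hv : t ≤ v <;> simp [hv, minF, oMin_none_left]

-- ----- B-side invariant -----
theorem bstep_spec {acc : List (Int × Option Int)} {F : List (Int × Int)} (h : INV acc F)
    (l0 : Option Int) (v : Int) :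
    INV (specStep acc v) (bstep (F, l0) v).1 ∧ (bstep (F, l0) v).2 = oSucc (minFA acc (v - 2)) := by
  obtain ⟨hs, hq⟩ := h
  have hfq : fQuery F v = minFA acc (v - 2) := hq (v - 2)
  unfold bstep specStep
  cases hcase : fQuery F v with
  | none =>
    rw [hcase] at hfq
    refine ⟨⟨hs, ?_⟩, by rw [← hfq]; rfl⟩
    intro t
    rw [minFA_append_singleton, hq t, ← hfq]
    simp only [oSucc]
    by_cases hv : t ≤ v <;> simp [hv, oMin_none_right]
  | some b =>
    rw [hcase] at hfq
    refine ⟨⟨fIns_sorted hs v (b + 1), ?_⟩, by rw [← hfq]; rfl⟩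
    intro t
    rw [qry_fIns hs, hq t, minFA_append_singleton, ← hfq]
    rfl

theorem lastSnd_append_singleton (l : List (Int × Option Int)) (p : Int × Option Int) :
    lastSnd (l ++ [p]) = p.2 := by
  induction l with
  | nil => rfl
  | cons q l ih =>
    cases l with
    | nil => rfl
    | cons r l => simpa [lastSnd] using ih

theorem bfold (vs : List Int) (acc : List (Int × Option Int)) (F : List (Int × Int)) (l0 : Option Int)
    (h : INV acc F) (hne : vs ≠ []) :
    (vs.foldl bstep (F, l0)).2 = lastSnd (vs.foldl specStep acc) := by
  induction vs generalizing acc F l0 with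
  | nil => exact absurd rfl hne
  | cons v vs ih =>
    simp only [List.foldl_cons]
    obtain ⟨hinv, hsnd⟩ := bstep_spec h l0 v
    cases vs with
    | nil =>
      simpa [specStep, lastSnd_append_singleton] using hsnd
    | cons w ws =>
      have := ih (specStep acc v) (bstep (F, l0) v).1 (bstep (F, l0) v).2 hinv (by simp)
      simpa using this

theorem inv_init (v0 : Int) : INV [(v0, some 0)] [(v0, 0)] := by
  refine ⟨List.pairwise_singleton _ _, fun t => ?_⟩
  by_cases h : t ≤ v0 <;> simp [qry, minFA, oMin, h]

-- ----- A-side -----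
theorem map_fst_sdp (acc : List (Int × Option Int)) (vs : List Int) :
    (vs.foldl specStep acc).map Prod.fst = acc.map Prod.fst ++ vs := by
  induction vs generalizing acc with
  | nil => simp
  | cons v vs ih => simp [specStep, ih]

theorem length_sdp (acc : List (Int × Option Int)) (vs : List Int) :
    (vs.foldl specStep acc).length = acc.length + vs.length := by
  induction vs generalizing acc with
  | nil => simp
  | cons v vs ih => simp [specStep, ih]; omega

theorem oSucc_fold {C : Int × Option Int → Prop} [DecidablePred C] (pairs : List (Int × Option Int)) (c : Option Int) :
    pairs.foldl (fun c p => if C p then oMin c (oSucc p.2) else c) (oSucc c)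
      = oSucc (pairs.foldl (fun c p => if C p then oMin c p.2 else c) c) := by
  induction pairs generalizing c with
  | nil => rfl
  | cons p pairs ih =>
    simp only [List.foldl_cons]
    by_cases h : C p <;> simp [h, ← oSucc_oMin, ih]

theorem getD_last (l : List (Int × Option Int)) (h : l ≠ []) :
    (l.map Prod.snd).getD (l.length - 1) none = lastSnd l := by
  induction l with
  | nil => exact absurd rfl h
  | cons p l ih =>
    cases l with
    | nil => rfl
    | cons q l =>
      have hl : (q :: l).length - 1 + 1 = (p :: q :: l).length - 1 := by simp
      calc ((p :: q :: l).map Prod.snd).getD ((p :: q :: l).length - 1) none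
          = ((q :: l).map Prod.snd).getD ((q :: l).length - 1) none := by
            rw [← hl]; rfl
        _ = lastSnd (q :: l) := ih (by simp)
        _ = lastSnd (p :: q :: l) := rfl

-- A's inner loop, written with the accumulator named
def istep (V : List Int) (i : Int) (dp : List (Option Int)) (j : Int) : List (Option Int) :=
  if PySem.List.pyGetD V i 0 - PySem.List.pyGetD V j 0 ≤ 2 then
    PySem.List.pySetD dp i (oMin (PySem.List.pyGetD dp i none) (oSucc (PySem.List.pyGetD dp j none)))
  else dp

def ostep (V : List Int) (dp : List (Option Int)) (i : Int) : List (Option Int) :=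
  (PySem.List.pyRange 0 i 1).foldl (istep V i) dp

-- the inner loop only ever writes cell i: it equals one write of a scalar fold
theorem inner_scalar (V : List Int) (dp : List (Option Int)) (i : Nat) (hi : i < dp.length)
    (m : Nat) (hm : m ≤ i) :
    (PySem.List.pyRange 0 (m : Int) 1).foldl (istep V (i : Int)) dp
      = PySem.List.pySetD dp (i : Int)
          ((PySem.List.pyRange 0 (m : Int) 1).foldl
            (fun c j => if PySem.List.pyGetD V (i : Int) 0 - PySem.List.pyGetD V j 0 ≤ 2 then
                oMin c (oSucc (PySem.List.pyGetD dp j none)) else c)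
            (PySem.List.pyGetD dp (i : Int) none)) := by
  induction m with
  | zero =>
    rw [PySem.List.pyRange_one_eq_nil (by omega)]
    simp only [List.foldl_nil, PySem.List.pySetD_natCast, PySem.List.pyGetD_natCast,
      List.getD_eq_getElem?_getD, List.getElem?_eq_getElem hi, Option.getD_some]
    exact (List.set_getElem_self hi).symm
  | succ m ih =>
    have hcast : ((m + 1 : Nat) : Int) = (m : Int) + 1 := by push_cast; ring
    rw [hcast, PySem.List.pyRange_one_succ_right (by omega), List.foldl_append, List.foldl_append,
      ih (by omega)]
    simp only [List.foldl_cons, List.foldl_nil]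
    show istep V i (PySem.List.pySetD dp (i : Int) _) (m : Int) = _
    unfold istep
    rw [PySem.List.pyGetD_pySetD_natCast _ _ _ _ _ hi, PySem.List.pyGetD_pySetD_natCast _ _ _ _ _ hi]
    have hmi : ¬ (m = i) := by omega
    simp only [hmi, if_false, if_true]
    split
    · simp only [PySem.List.pySetD_natCast, List.set_set]
    · rfl

-- an index fold over two parallel lists is a fold over their zip
theorem fold_zip (xs : List Int) (ys : List (Option Int)) (w : Int) (c0 : Option Int)
    (m : Nat) (hx : m ≤ xs.length) (hy : m ≤ ys.length) :
    (PySem.List.pyRange 0 (m : Int) 1).foldl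
        (fun c j => if w - PySem.List.pyGetD xs j 0 ≤ 2 then
            oMin c (oSucc (PySem.List.pyGetD ys j none)) else c) c0
      = ((xs.zip ys).take m).foldl
          (fun c p => if w - p.1 ≤ 2 then oMin c (oSucc p.2) else c) c0 := by
  induction m with
  | zero => rw [PySem.List.pyRange_one_eq_nil (by omega)]; simp
  | succ m ih =>
    have hcast : ((m + 1 : Nat) : Int) = (m : Int) + 1 := by push_cast; ring
    have hzm : m < (xs.zip ys).length := by rw [List.length_zip]; omega
    rw [hcast, PySem.List.pyRange_one_succ_right (by omega), List.foldl_append,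
      ih (by omega) (by omega), List.take_add_one, List.getElem?_eq_getElem hzm, List.foldl_append]
    simp only [List.foldl_cons, List.foldl_nil, Option.toList_some, List.getElem_zip,
      PySem.List.pyGetD_natCast, List.getD_eq_getElem?_getD,
      List.getElem?_eq_getElem (by omega : m < xs.length),
      List.getElem?_eq_getElem (by omega : m < ys.length), Option.getD_some]

theorem zip_take_pairs (pairs : List (Int × Option Int)) (r1 : List Int) (r2 : List (Option Int))
    (n : Nat) (hn : n = pairs.length) :
    ((pairs.map Prod.fst ++ r1).zip (pairs.map Prod.snd ++ r2)).take n = pairs := by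
  subst hn
  rw [List.zip_append (by simp)]
  rw [show pairs.length = ((pairs.map Prod.fst).zip (pairs.map Prod.snd)).length by simp]
  rw [List.take_left]
  exact (List.zip_of_prod rfl rfl).symm

theorem set_append_replicate {α : Type} (A : List α) (k : Nat) (c x : α) (n : Nat)
    (hn : n = A.length) (hk : 0 < k) :
    (A ++ List.replicate k c).set n x = A ++ x :: List.replicate (k - 1) c := by
  subst hn
  obtain ⟨j, rfl⟩ : ∃ j, k = j + 1 := ⟨k - 1, by omega⟩
  rw [List.replicate_succ, List.set_append_right _ _ (le_refl _)]
  simp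

-- the outer loop builds exactly the spec pair list
theorem outer_spec (v0 : Int) (rest : List Int) (m : Nat) (hm : m ≤ rest.length) :
    (PySem.List.pyRange 1 ((m : Int) + 1) 1).foldl (ostep (v0 :: rest))
        (some 0 :: List.replicate rest.length none)
      = ((rest.take m).foldl specStep [(v0, some 0)]).map Prod.snd
          ++ List.replicate (rest.length - m) none := by
  induction m with
  | zero =>
    rw [show ((0 : Nat) : Int) + 1 = 1 by ring, PySem.List.pyRange_one_eq_nil (by omega)]
    simp
  | succ m ih =>
    have hm' : m ≤ rest.length := by omega
    set pairs := (rest.take m).foldl specStep [(v0, some 0)] with hpairs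
    have hlenp : pairs.length = 1 + m := by
      rw [hpairs, length_sdp]; simp [List.length_take, Nat.min_eq_left hm']
    have hcast : ((m + 1 : Nat) : Int) + 1 = ((m : Int) + 1) + 1 := by push_cast; ring
    rw [hcast, PySem.List.pyRange_one_succ_right (by omega), List.foldl_append, ih hm']
    simp only [List.foldl_cons, List.foldl_nil]
    set dpm := pairs.map Prod.snd ++ List.replicate (rest.length - m) none with hdpm
    have hlend : dpm.length = rest.length + 1 := by
      rw [hdpm]; simp [hlenp]; omega
    have hidx : ((m : Int) + 1) = ((m + 1 : Nat) : Int) := by push_cast; ring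
    have hmlt : m + 1 < dpm.length := by omega
    rw [show ostep (v0 :: rest) dpm ((m : Int) + 1)
        = (PySem.List.pyRange 0 ((m : Int) + 1) 1).foldl (istep (v0 :: rest) ((m : Int) + 1)) dpm from rfl]
    rw [hidx, inner_scalar _ _ _ hmlt _ (le_refl _)]
    -- the cell read at i = m+1 is still none
    have hlenmap : (pairs.map Prod.snd).length = 1 + m := by simp [hlenp]
    have hcell : PySem.List.pyGetD dpm ((m + 1 : Nat) : Int) none = none := by
      rw [PySem.List.pyGetD_natCast, List.getD_eq_getElem?_getD, hdpm,
        List.getElem?_append_right (by rw [hlenmap]; omega), hlenmap]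
      rw [List.getElem?_replicate]
      split <;> rfl
    -- the stone value at i = m+1
    have hw : PySem.List.pyGetD (v0 :: rest) ((m + 1 : Nat) : Int) 0 = rest[m]'(by omega) := by
      rw [PySem.List.pyGetD_natCast, List.getD_eq_getElem?_getD,
        List.getElem?_cons_succ, List.getElem?_eq_getElem (by omega : m < rest.length)]
      rfl
    rw [hcell, hw]
    have hvfst : v0 :: rest = pairs.map Prod.fst ++ rest.drop m := by
      rw [hpairs, map_fst_sdp]
      simp [List.take_append_drop]
    rw [show (v0 :: rest) = pairs.map Prod.fst ++ rest.drop m from hvfst] at *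
    rw [fold_zip _ _ _ _ (m + 1) (by simp [hlenp]; omega) (by omega), hdpm]
    rw [zip_take_pairs _ _ _ _ (by omega)]
    -- switch the guard to the spec's form and pull oSucc out
    have hcongr := PySem.List.foldl_congr_mem pairs
      (fun (c : Option Int) (p : Int × Option Int) =>
        if rest[m]'(by omega) - p.1 ≤ 2 then oMin c (oSucc p.2) else c)
      (fun (c : Option Int) (p : Int × Option Int) =>
        if rest[m]'(by omega) - 2 ≤ p.1 then oMin c (oSucc p.2) else c)
      none
      (by intro acc x hx
          have hiff : (rest[m]'(by omega) - x.1 ≤ 2) = (rest[m]'(by omega) - 2 ≤ x.1) := by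
            apply propext; omega
          simp only [hiff])
    rw [hcongr]
    have hos := oSucc_fold (C := fun (p : Int × Option Int) => rest[m]'(by omega) - 2 ≤ p.1) pairs none
    rw [show (oSucc none : Option Int) = none from rfl] at hos
    rw [hos]
    rw [show pairs.foldl (fun c p => if rest[m]'(by omega) - 2 ≤ p.1 then oMin c p.2 else c) none
        = minFA pairs (rest[m]'(by omega) - 2) from rfl]
    rw [PySem.List.pySetD_natCast]
    rw [set_append_replicate _ _ _ _ (m + 1) (by rw [hlenmap]; omega) (by omega)]
    have htake : rest.take (m + 1) = rest.take m ++ [rest[m]'(by omega)] := by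
      rw [List.take_add_one, List.getElem?_eq_getElem (by omega : m < rest.length)]
      rfl
    rw [htake, List.foldl_append]
    simp only [List.foldl_cons, List.foldl_nil]
    rw [show (rest.take m).foldl specStep [(v0, some 0)] = pairs from rfl]
    unfold specStep
    rw [List.map_append]
    simp only [List.map_cons, List.map_nil, List.append_assoc]
    rw [show rest.length - (m + 1) = rest.length - m - 1 from by omega]
    simp

theorem dp_init (n : Nat) :
    PySem.List.pySetD (List.replicate (n + 1) (none : Option Int)) 0 (some 0)
      = some 0 :: List.replicate n none := by
  rw [PySem.List.pySetD_of_nonneg _ _ (by omega)]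
  rfl

theorem frog_jump_with_obstacles_spec : Claim_equal_frog_jump_with_obstacles := by
  intro stones obstacles _
  unfold Spec_frog_jump_with_obstacles frog_jump_with_obstacles frog_jump_with_obstacles_alt
  simp only []
  generalize stones.filter (fun s => !(PySem.Set.contains (PySem.Set.ofList obstacles) s)) = V
  cases V with
  | nil => rfl
  | cons v0 rest0 =>
    cases rest0 with
    | nil => rfl
    | cons v1 rest' =>
      -- the guard is false: at least two valid stones
      rw [if_neg (by simp)]
      simp only [PySem.List.len_eq, List.length_cons]
      rw [dp_init (rest'.length + 1)]
      -- outer loop: the dp table is the spec pair list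
      rw [show (fun dp i => (PySem.List.pyRange 0 i 1).foldl (fun dp j =>
            let jump_distance := PySem.List.pyGetD (v0 :: v1 :: rest') i 0 - PySem.List.pyGetD (v0 :: v1 :: rest') j 0
            if jump_distance ≤ 2 then
              PySem.List.pySetD dp i (oMin (PySem.List.pyGetD dp i none) (oSucc (PySem.List.pyGetD dp j none)))
            else dp) dp) = ostep (v0 :: v1 :: rest') from rfl]
      have houter := outer_spec v0 (v1 :: rest') (v1 :: rest').length (le_refl _)
      rw [List.take_length] at houter
      simp only [List.length_cons, Nat.sub_self, List.replicate_zero, List.append_nil] at houter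
      rw [show ((rest'.length + 1 + 1 : Nat) : Int) = ((rest'.length + 1 : Nat) : Int) + 1 by push_cast; ring]
      rw [houter]
      -- final read: the last spec dp value
      set pairs := (v1 :: rest').foldl specStep [(v0, some 0)] with hpairs
      have hlen : pairs.length = 1 + (rest'.length + 1) := by
        rw [hpairs, length_sdp]; simp
      rw [show ((rest'.length + 1 : Nat) : Int) + 1 - 1 = ((rest'.length + 1 : Nat) : Int) by ring]
      rw [PySem.List.pyGetD_natCast]
      rw [show rest'.length + 1 = pairs.length - 1 by omega]
      rw [getD_last pairs (by intro h; rw [h] at hlen; simp at hlen)]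
      -- B's fold tracks the same last value
      rw [show (fun (st : List (Int × Int) × Option Int) v =>
            match fQuery st.1 v with
            | none => (st.1, none)
            | some b => (fInsert st.1 v (b + 1), some (b + 1))) = bstep from rfl]
      rw [bfold (v1 :: rest') [(v0, some 0)] [(v0, 0)] none (inv_init v0) (by simp)]
      rw [← hpairs]
      cases lastSnd pairs <;> rfl
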